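-- pv_equiv track=rewrite | github.com/kimhons/ai-writing-platform | writecrew-backend/src/agents/structure_architect.py | _suggest_transitions
-- ===== SOURCE A (Python) =====
-- from typing import Dict, List, Optional, Any, Tuple
--
-- def _suggest_transitions(first_sentence: str, paragraph_index: int) -> List[str]:
--     """Suggest appropriate transitions for a sentence"""
--     suggestions = []
--
--     # Context-based suggestions
--     if paragraph_index == 0:
--         # First paragraph - no transition needed
--         return []
--
--     sentence_lower = first_sentence.lower()
--
--     # If sentence already has transition, suggest alternatives
--     if any(word in sentence_lower for word in ['however', 'therefore', 'furthermore']):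
--         suggestions.extend([
--             'Nevertheless, ' + first_sentence,
--             'Consequently, ' + first_sentence,
--             'Moreover, ' + first_sentence
--         ])
--     else:
--         # Suggest appropriate transitions based on content
--         if any(word in sentence_lower for word in ['different', 'opposite', 'contrast']):
--             suggestions.extend([
--                 'However, ' + first_sentence,
--                 'In contrast, ' + first_sentence,
--                 'On the other hand, ' + first_sentence
--             ])
--         elif any(word in sentence_lower for word in ['result', 'because', 'cause']):
--             suggestions.extend([
--                 'Therefore, ' + first_sentence,
--                 'Consequently, ' + first_sentence,
--                 'As a result, ' + first_sentence
--             ])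
--         else:
--             suggestions.extend([
--                 'Furthermore, ' + first_sentence,
--                 'Additionally, ' + first_sentence,
--                 'Moreover, ' + first_sentence
--             ])
--
--     return suggestions[:3]  # Return top 3 suggestions
-- ===== SOURCE B (Python) =====
-- # Alternative algorithm: one left-to-right scan of the lowered sentence keeping the
-- # minimum-priority category of any keyword starting at each position, instead of
-- # nine independent substring searches in an if/elif cascade.
-- _KEYWORDS = [
--     ('however', 0), ('therefore', 0), ('furthermore', 0),
--     ('different', 1), ('opposite', 1), ('contrast', 1),
--     ('result', 2), ('because', 2), ('cause', 2),
-- ]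
-- _PREFIX_TABLE = [
--     ['Nevertheless, ', 'Consequently, ', 'Moreover, '],
--     ['However, ', 'In contrast, ', 'On the other hand, '],
--     ['Therefore, ', 'Consequently, ', 'As a result, '],
--     ['Furthermore, ', 'Additionally, ', 'Moreover, '],
-- ]
--
-- def _suggest_transitions(first_sentence: str, paragraph_index: int):
--     if paragraph_index == 0:
--         return []
--     s = first_sentence.lower()
--     best = 3
--     for i in range(len(s)):
--         for kw, cat in _KEYWORDS:
--             if cat < best and s.startswith(kw, i):
--                 best = cat
--     return [p + first_sentence for p in _PREFIX_TABLE[best]]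
-- ===== Notes on version B (the rewrite author's own statement) =====
-- stated objective: alternative
-- what changed: Replaces the if/elif cascade of nine independent substring searches with a single left-to-right scan over the lowered sentence that keeps the minimum-priority category of any keyword starting at each position and then indexes one flat prefix table; correct because the cascade's branch order coincides with the minimum category over all occurring keywords. Trades C-optimized 'in' searches for a pure-Python position scan, so it is not faster.
import Mathlib
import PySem

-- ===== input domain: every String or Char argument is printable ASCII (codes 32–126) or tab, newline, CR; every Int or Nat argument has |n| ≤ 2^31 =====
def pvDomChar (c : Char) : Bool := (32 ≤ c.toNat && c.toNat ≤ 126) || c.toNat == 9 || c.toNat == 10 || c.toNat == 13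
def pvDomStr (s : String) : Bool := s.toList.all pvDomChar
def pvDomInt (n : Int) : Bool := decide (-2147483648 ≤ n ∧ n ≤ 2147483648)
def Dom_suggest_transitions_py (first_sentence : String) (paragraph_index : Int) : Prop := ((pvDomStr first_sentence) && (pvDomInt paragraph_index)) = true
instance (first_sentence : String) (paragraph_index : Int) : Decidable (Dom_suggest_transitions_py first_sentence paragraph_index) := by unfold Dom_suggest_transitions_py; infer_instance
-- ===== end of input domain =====

-- B replaces A's if/elif cascade of nine independent substring searches by one left-to-right
-- scan of the lowered sentence keeping the minimum-priority matched category (alternative algorithm).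

-- ===== PORT A =====
def suggest_transitions_py (first_sentence : String) (paragraph_index : Int) : List String :=
  let suggestions : List String := []
  if paragraph_index == 0 then
    []
  else
    let sentence_lower := PySem.Str.lower first_sentence
    let suggestions :=
      if ["however", "therefore", "furthermore"].any (fun w => PySem.Str.isIn w sentence_lower) then
        suggestions ++ ["Nevertheless, " ++ first_sentence, "Consequently, " ++ first_sentence, "Moreover, " ++ first_sentence]
      else if ["different", "opposite", "contrast"].any (fun w => PySem.Str.isIn w sentence_lower) then
        suggestions ++ ["However, " ++ first_sentence, "In contrast, " ++ first_sentence, "On the other hand, " ++ first_sentence]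
      else if ["result", "because", "cause"].any (fun w => PySem.Str.isIn w sentence_lower) then
        suggestions ++ ["Therefore, " ++ first_sentence, "Consequently, " ++ first_sentence, "As a result, " ++ first_sentence]
      else
        suggestions ++ ["Furthermore, " ++ first_sentence, "Additionally, " ++ first_sentence, "Moreover, " ++ first_sentence]
    PySem.List.slice suggestions none (some 3)

-- ===== PORT B =====
def pvKeywords : List (List Char × Nat) :=
  [ ("however".toList, 0), ("therefore".toList, 0), ("furthermore".toList, 0),
    ("different".toList, 1), ("opposite".toList, 1), ("contrast".toList, 1),
    ("result".toList, 2), ("because".toList, 2), ("cause".toList, 2) ]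

def pvTable : List (List String) :=
  [ ["Nevertheless, ", "Consequently, ", "Moreover, "],
    ["However, ", "In contrast, ", "On the other hand, "],
    ["Therefore, ", "Consequently, ", "As a result, "],
    ["Furthermore, ", "Additionally, ", "Moreover, "] ]

-- body of the inner 'for kw, cat in _KEYWORDS' loop: 'if cat < best and s.startswith(kw, i)';
-- s.startswith(kw, i) with 0 ≤ i is exactly kw being a prefix of the character list dropped at i
def pvUpd (q : List Char) (b : Nat) (p : List Char × Nat) : Nat :=
  if p.2 < b ∧ p.1.isPrefixOf q = true then p.2 else b

def pvStep (L : List Char) (i : Nat) (b : Nat) : Nat :=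
  pvKeywords.foldl (pvUpd (L.drop i)) b

-- outer 'for i in range(len(s))' loop (len(s) ≥ 0, so range(len(s)) = List.range, exact)
def pvBest (L : List Char) : Nat :=
  (List.range L.length).foldl (fun b i => pvStep L i b) 3

def suggest_transitions_py_alt (first_sentence : String) (paragraph_index : Int) : List String :=
  if paragraph_index == 0 then []
  else
    let L := (PySem.Str.lower first_sentence).toList
    -- _PREFIX_TABLE[best]: best is always in [0,3], so list indexing never fails; getD is exact here
    (pvTable.getD (pvBest L) []).map (fun p => p ++ first_sentence)

-- ===== PRECONDITION & SPEC =====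
def Spec_suggest_transitions_py (first_sentence : String) (paragraph_index : Int) (out : List String) : Prop := out = suggest_transitions_py_alt first_sentence paragraph_index
instance (first_sentence : String) (paragraph_index : Int) (out : List String) : Decidable (Spec_suggest_transitions_py first_sentence paragraph_index out) := by unfold Spec_suggest_transitions_py; infer_instance

-- ===== CLAIM (what is proved, stated in full; the proofs are below) =====
def Claim_equal_suggest_transitions_py : Prop := ∀ (first_sentence : String) (paragraph_index : Int), Dom_suggest_transitions_py first_sentence paragraph_index → Spec_suggest_transitions_py first_sentence paragraph_index (suggest_transitions_py first_sentence paragraph_index)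

-- ===== LEMMAS AND PROOFS =====

-- min-fold facts for the inner keyword loop
theorem pvUpd_le (q : List Char) (b : Nat) (p : List Char × Nat) : pvUpd q b p ≤ b := by
  unfold pvUpd; split_ifs with h <;> omega

theorem pvFold_le (q : List Char) (K : List (List Char × Nat)) (b : Nat) :
    K.foldl (pvUpd q) b ≤ b := by
  induction K generalizing b with
  | nil => simp
  | cons a K ih =>
    simp only [List.foldl_cons]
    exact le_trans (ih _) (pvUpd_le q b a)

theorem pvFold_reach (q : List Char) (K : List (List Char × Nat)) (b : Nat)
    (p : List Char × Nat) (hp : p ∈ K) (hc : p.1.isPrefixOf q = true) :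
    K.foldl (pvUpd q) b ≤ p.2 := by
  induction K generalizing b with
  | nil => simp at hp
  | cons a K ih =>
    simp only [List.foldl_cons]
    rcases List.mem_cons.mp hp with rfl | hp'
    · refine le_trans (pvFold_le q K _) ?_
      unfold pvUpd
      split_ifs with h
      · omega
      · have hnb : ¬ p.2 < b := fun hlt => h ⟨hlt, hc⟩
        omega
    · exact ih _ hp'

theorem pvFold_ge (q : List Char) (K : List (List Char × Nat)) (b m : Nat)
    (hb : m ≤ b) (h : ∀ p ∈ K, p.1.isPrefixOf q = true → m ≤ p.2) :
    m ≤ K.foldl (pvUpd q) b := by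
  induction K generalizing b with
  | nil => simpa
  | cons a K ih =>
    simp only [List.foldl_cons]
    refine ih _ ?_ (fun p hp hc => h p (List.mem_cons_of_mem _ hp) hc)
    unfold pvUpd
    split_ifs with hcond
    · exact h a List.mem_cons_self hcond.2
    · exact hb

-- generic facts for the outer position loop
theorem pvOuter_le (h : Nat → Nat → Nat) (H : ∀ b i, h b i ≤ b) (l : List Nat) (b : Nat) :
    l.foldl h b ≤ b := by
  induction l generalizing b with
  | nil => simp
  | cons a l ih => exact le_trans (ih _) (H b a)

theorem pvOuter_reach (h : Nat → Nat → Nat) (H : ∀ b i, h b i ≤ b) (l : List Nat) (b : Nat)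
    (i : Nat) (hi : i ∈ l) (c : Nat) (hc : ∀ b, h b i ≤ c) :
    l.foldl h b ≤ c := by
  induction l generalizing b with
  | nil => simp at hi
  | cons a l ih =>
    simp only [List.foldl_cons]
    rcases List.mem_cons.mp hi with rfl | hi'
    · exact le_trans (pvOuter_le h H l _) (hc b)
    · exact ih _ hi'

theorem pvOuter_ge (h : Nat → Nat → Nat) (l : List Nat) (b m : Nat)
    (hb : m ≤ b) (H : ∀ b i, i ∈ l → m ≤ b → m ≤ h b i) :
    m ≤ l.foldl h b := by
  induction l generalizing b with
  | nil => simpa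
  | cons a l ih =>
    exact ih _ (H b a List.mem_cons_self hb) (fun b i hi hb' => H b i (List.mem_cons_of_mem _ hi) hb')

theorem pvStep_le (L : List Char) (i b : Nat) : pvStep L i b ≤ b :=
  pvFold_le _ _ _

theorem pvBest_le_three (L : List Char) : pvBest L ≤ 3 :=
  pvOuter_le _ (fun b i => pvStep_le L i b) _ 3

theorem pvBest_le_of_isIn (L : List Char) (kw : List Char) (c : Nat)
    (hmem : (kw, c) ∈ pvKeywords) (hne : kw ≠ [])
    (hin : PySem.Chars.isIn kw L = true) : pvBest L ≤ c := by
  obtain ⟨j, hj⟩ := (PySem.Chars.exists_prefix_drop_iff_isIn kw L).mpr hin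
  have hjlt : j < L.length := by
    by_contra hge
    have : L.drop j = [] := List.drop_eq_nil_of_le (by omega)
    rw [this] at hj
    exact hne (List.prefix_nil.mp hj)
  unfold pvBest
  refine pvOuter_reach _ (fun b i => pvStep_le L i b) _ 3 j (List.mem_range.mpr hjlt) c ?_
  intro b
  exact pvFold_reach (L.drop j) pvKeywords b (kw, c) hmem (List.isPrefixOf_iff_prefix.mpr hj)

theorem pvBest_ge (L : List Char) (m : Nat) (hm : m ≤ 3)
    (h : ∀ p ∈ pvKeywords, p.2 < m → PySem.Chars.isIn p.1 L = false) :
    m ≤ pvBest L := by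
  unfold pvBest
  refine pvOuter_ge _ _ 3 m hm ?_
  intro b i _ hb
  unfold pvStep
  refine pvFold_ge _ _ b m hb ?_
  intro p hp hpre
  by_contra hlt
  have hin : PySem.Chars.isIn p.1 L = true := by
    refine (PySem.Chars.exists_prefix_drop_iff_isIn p.1 L).mp ⟨i, ?_⟩
    exact List.isPrefixOf_iff_prefix.mp hpre
  have := h p hp (by omega)
  simp [this] at hin

-- evaluation of B's scan as the cascade of occurrence tests
theorem pvBest_eq (L : List Char) :
    pvBest L =
      (if PySem.Chars.isIn "however".toList L = true ∨ PySem.Chars.isIn "therefore".toList L = true ∨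
          PySem.Chars.isIn "furthermore".toList L = true then 0
       else if PySem.Chars.isIn "different".toList L = true ∨ PySem.Chars.isIn "opposite".toList L = true ∨
          PySem.Chars.isIn "contrast".toList L = true then 1
       else if PySem.Chars.isIn "result".toList L = true ∨ PySem.Chars.isIn "because".toList L = true ∨
          PySem.Chars.isIn "cause".toList L = true then 2
       else 3) := by
  split_ifs with h0 h1 h2
  · have hle : pvBest L ≤ 0 := by
      rcases h0 with h | h | h
      · exact pvBest_le_of_isIn L _ 0 (by simp [pvKeywords]) (by decide) h
      · exact pvBest_le_of_isIn L _ 0 (by simp [pvKeywords]) (by decide) h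
      · exact pvBest_le_of_isIn L _ 0 (by simp [pvKeywords]) (by decide) h
    omega
  · push Not at h0
    have hle : pvBest L ≤ 1 := by
      rcases h1 with h | h | h
      · exact pvBest_le_of_isIn L _ 1 (by simp [pvKeywords]) (by decide) h
      · exact pvBest_le_of_isIn L _ 1 (by simp [pvKeywords]) (by decide) h
      · exact pvBest_le_of_isIn L _ 1 (by simp [pvKeywords]) (by decide) h
    have hge : 1 ≤ pvBest L := by
      refine pvBest_ge L 1 (by omega) ?_
      intro p hp hlt
      simp only [pvKeywords, List.mem_cons, List.not_mem_nil, or_false] at hp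
      rcases hp with rfl | rfl | rfl | rfl | rfl | rfl | rfl | rfl | rfl <;>
        first
          | exact Bool.eq_false_iff.mpr h0.1
          | exact Bool.eq_false_iff.mpr h0.2.1
          | exact Bool.eq_false_iff.mpr h0.2.2
          | omega
    omega
  · push Not at h0 h1
    have hle : pvBest L ≤ 2 := by
      rcases h2 with h | h | h
      · exact pvBest_le_of_isIn L _ 2 (by simp [pvKeywords]) (by decide) h
      · exact pvBest_le_of_isIn L _ 2 (by simp [pvKeywords]) (by decide) h
      · exact pvBest_le_of_isIn L _ 2 (by simp [pvKeywords]) (by decide) h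
    have hge : 2 ≤ pvBest L := by
      refine pvBest_ge L 2 (by omega) ?_
      intro p hp hlt
      simp only [pvKeywords, List.mem_cons, List.not_mem_nil, or_false] at hp
      rcases hp with rfl | rfl | rfl | rfl | rfl | rfl | rfl | rfl | rfl <;>
        first
          | exact Bool.eq_false_iff.mpr h0.1
          | exact Bool.eq_false_iff.mpr h0.2.1
          | exact Bool.eq_false_iff.mpr h0.2.2
          | exact Bool.eq_false_iff.mpr h1.1
          | exact Bool.eq_false_iff.mpr h1.2.1
          | exact Bool.eq_false_iff.mpr h1.2.2
          | omega
    omega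
  · push Not at h0 h1 h2
    have hge : 3 ≤ pvBest L := by
      refine pvBest_ge L 3 (by omega) ?_
      intro p hp hlt
      simp only [pvKeywords, List.mem_cons, List.not_mem_nil, or_false] at hp
      rcases hp with rfl | rfl | rfl | rfl | rfl | rfl | rfl | rfl | rfl <;>
        first
          | exact Bool.eq_false_iff.mpr h0.1
          | exact Bool.eq_false_iff.mpr h0.2.1
          | exact Bool.eq_false_iff.mpr h0.2.2
          | exact Bool.eq_false_iff.mpr h1.1
          | exact Bool.eq_false_iff.mpr h1.2.1
          | exact Bool.eq_false_iff.mpr h1.2.2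
          | exact Bool.eq_false_iff.mpr h2.1
          | exact Bool.eq_false_iff.mpr h2.2.1
          | exact Bool.eq_false_iff.mpr h2.2.2
    have := pvBest_le_three L
    omega

-- A's '.any' tests as the same disjunctions of Chars.isIn
theorem pvAny_iff (w1 w2 w3 t : String) :
    ([w1, w2, w3].any (fun w => PySem.Str.isIn w t)) = true ↔
      (PySem.Chars.isIn w1.toList t.toList = true ∨ PySem.Chars.isIn w2.toList t.toList = true ∨
       PySem.Chars.isIn w3.toList t.toList = true) := by
  simp [PySem.Str.isIn_eq]

-- ===== VERDICT (by name: the statement is the Claim_ definition above) =====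
theorem suggest_transitions_py_spec : Claim_equal_suggest_transitions_py := by
  intro fs pi _
  unfold Spec_suggest_transitions_py suggest_transitions_py suggest_transitions_py_alt
  by_cases hpi : pi == 0
  · simp only [hpi, if_true]
  · simp only [hpi, Bool.false_eq_true, if_false]
    have hb := pvBest_eq (PySem.Str.lower fs).toList
    by_cases h0 : PySem.Chars.isIn "however".toList (PySem.Str.lower fs).toList = true ∨
        PySem.Chars.isIn "therefore".toList (PySem.Str.lower fs).toList = true ∨
        PySem.Chars.isIn "furthermore".toList (PySem.Str.lower fs).toList = true
    · rw [if_pos h0] at hb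
      rw [if_pos ((pvAny_iff _ _ _ _).mpr h0), hb]
      simp [pvTable, PySem.List.slice]
    · rw [if_neg h0] at hb
      rw [if_neg (fun hc => h0 ((pvAny_iff _ _ _ _).mp hc))]
      by_cases h1 : PySem.Chars.isIn "different".toList (PySem.Str.lower fs).toList = true ∨
          PySem.Chars.isIn "opposite".toList (PySem.Str.lower fs).toList = true ∨
          PySem.Chars.isIn "contrast".toList (PySem.Str.lower fs).toList = true
      · rw [if_pos h1] at hb
        rw [if_pos ((pvAny_iff _ _ _ _).mpr h1), hb]
        simp [pvTable, PySem.List.slice]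
      · rw [if_neg h1] at hb
        rw [if_neg (fun hc => h1 ((pvAny_iff _ _ _ _).mp hc))]
        by_cases h2 : PySem.Chars.isIn "result".toList (PySem.Str.lower fs).toList = true ∨
            PySem.Chars.isIn "because".toList (PySem.Str.lower fs).toList = true ∨
            PySem.Chars.isIn "cause".toList (PySem.Str.lower fs).toList = true
        · rw [if_pos h2] at hb
          rw [if_pos ((pvAny_iff _ _ _ _).mpr h2), hb]
          simp [pvTable, PySem.List.slice]
        · rw [if_neg h2] at hb
          rw [if_neg (fun hc => h2 ((pvAny_iff _ _ _ _).mp hc)), hb]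
          simp [pvTable, PySem.List.slice]
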